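-- pv_equiv track=rewrite | github.com/const-dominik/university-courses | mia2/1_c.py | split_public_key
-- ===== SOURCE A (Python) =====
-- def split_public_key(pk, a, b):
--     n = len(pk)
--     pref_mod_a = 0
--     prefix_positions = []
--
--     for i, digit in enumerate(pk, 1):
--         pref_mod_a = (pref_mod_a * 10 + int(digit)) % a
--         if i < n and pref_mod_a == 0 and pk[i] != "0":
--             prefix_positions.append(i)
--
--     suff_mod_b = 0
--     p_b = 1
--     i = n
--
--     for pos in reversed(prefix_positions):
--         for i in range(i - 1, pos - 1, -1):
--             suff_mod_b = (suff_mod_b + int(pk[i]) * p_b) % b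
--             p_b = p_b * 10 % b
--
--         if not suff_mod_b:
--             return "YES", int(pk[:i]), int(pk[i:])
--     return "NO", None, None
-- ===== SOURCE B (Python) =====
-- def split_public_key(pk, a, b):
--     n = len(pk)
--     cand = []
--     m = 0
--     for i in range(1, n):
--         m = (m * 10 + int(pk[i - 1])) % a
--         if m == 0 and pk[i] != "0":
--             cand.append(i)
--     if cand:
--         pref_b = []
--         m = 0
--         for d in pk:
--             pref_b.append(m)
--             m = (m * 10 + int(d)) % b
--         total = m
--         # suffix int(pk[i:]) == int(pk) - int(pk[:i]) * 10**(n-i), so its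
--         # b-divisibility follows from prefix-mods of b and modular exponentiation
--         for i in reversed(cand):
--             if (total - pref_b[i] * pow(10, n - i, b)) % b == 0:
--                 return "YES", int(pk[:i]), int(pk[i:])
--     return "NO", None, None
-- ===== Notes on version B (the rewrite author's own statement) =====
-- stated objective: alternative
-- what changed: A finds b-divisible suffixes with a backward digit-by-digit suffix-mod accumulator shared incrementally across candidate positions; B never scans the suffix at all: it tests each candidate split algebraically via int(pk[i:]) = int(pk) - int(pk[:i])*10^(n-i), using a forward prefix-mod-b table, the total mod b and built-in modular exponentiation pow(10, n-i, b).
import Mathlib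
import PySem

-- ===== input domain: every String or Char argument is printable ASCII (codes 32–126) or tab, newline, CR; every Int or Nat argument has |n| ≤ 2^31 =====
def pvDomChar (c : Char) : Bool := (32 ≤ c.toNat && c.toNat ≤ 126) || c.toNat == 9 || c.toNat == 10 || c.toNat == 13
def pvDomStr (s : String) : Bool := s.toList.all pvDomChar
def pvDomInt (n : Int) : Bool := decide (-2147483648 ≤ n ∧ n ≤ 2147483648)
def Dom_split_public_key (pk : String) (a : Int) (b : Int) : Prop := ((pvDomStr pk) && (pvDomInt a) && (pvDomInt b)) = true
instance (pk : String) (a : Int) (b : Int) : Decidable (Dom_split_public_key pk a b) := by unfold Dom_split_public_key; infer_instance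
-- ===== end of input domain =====

-- B decides suffix divisibility algebraically — int(pk[i:]) = int(pk) - int(pk[:i])·10^(n-i), using
-- prefix-mods of b, the total mod b and modular exponentiation — instead of A's backward
-- digit-by-digit suffix accumulator shared across candidate positions (objective: alternative).

-- int(c) for a single character c (both Pythons call int() on one character)
def pyIntChar (c : Char) : Int := (PySem.Int.ofChars? [c]).getD 0

-- integer value of a digit string (used by Pre_ to state when a qualifying split position exists)
def pvVal (l : List Char) : Int := l.foldl (fun v c => v * 10 + pyIntChar c) 0

-- ===== PORT A =====
-- body of A's first loop (over enumerate(pk, 1)): state (i, pref_mod_a, prefix_positions)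
def pvAStep1 (pk : String) (a : Int) (n : Int) (st : Int × Int × List Int) (c : Char) : Int × Int × List Int :=
  let i := st.1 + 1
  let pm := PySem.Int.mod (st.2.1 * 10 + pyIntChar c) a
  (i, pm,
    if i < n ∧ pm = 0 ∧ (PySem.List.pyGet? pk.toList i).getD ' ' ≠ '0'
    then st.2.2 ++ [i] else st.2.2)

-- A's inner `for i in range(i-1, pos-1, -1)` loop: state (suff_mod_b, p_b, i)
def pvAInner (pk : String) (b : Int) (rng : List Int) (st : Int × Int × Int) : Int × Int × Int :=
  rng.foldl (fun q j =>
    (PySem.Int.mod (q.1 + pyIntChar ((PySem.List.pyGet? pk.toList j).getD ' ') * q.2.1) b,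
     PySem.Int.mod (q.2.1 * 10) b, j)) st

-- A's `for pos in reversed(prefix_positions)` loop with its early return
def pvALoop (pk : String) (b : Int) : List Int → Int × Int × Int → String × Option Int × Option Int
  | [], _ => ("NO", none, none)
  | pos :: rest, st =>
    let st' := pvAInner pk b (PySem.List.pyRange (st.2.2 - 1) (pos - 1) (-1)) st
    if st'.1 = 0 then
      ("YES", some ((PySem.Int.ofStr? (PySem.Str.slice pk none (some st'.2.2))).getD 0),
              some ((PySem.Int.ofStr? (PySem.Str.slice pk (some st'.2.2) none)).getD 0))
    else pvALoop pk b rest st'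

def split_public_key (pk : String) (a : Int) (b : Int) : String × Option Int × Option Int :=
  let n : Int := (pk.toList.length : Int)
  let fst := pk.toList.foldl (pvAStep1 pk a n) (0, 0, [])
  pvALoop pk b fst.2.2.reverse (0, 1, n)

-- ===== PORT B =====
-- Python pow(10, e, b): exact for e ≥ 0 and b ≠ 0 (B only calls it so)
def pvPow10Mod (e : Int) (b : Int) : Int := PySem.Int.mod (10 ^ e.toNat) b

-- B's `for i in reversed(cand)` loop with its early return
def pvBFind (pk : String) (b : Int) (n : Int) (prefb : List Int) (total : Int) :
    List Int → String × Option Int × Option Int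
  | [] => ("NO", none, none)
  | i :: rest =>
    if PySem.Int.mod (total - PySem.List.pyGetD prefb i 0 * pvPow10Mod (n - i) b) b = 0 then
      ("YES", some ((PySem.Int.ofStr? (PySem.Str.slice pk none (some i))).getD 0),
              some ((PySem.Int.ofStr? (PySem.Str.slice pk (some i) none)).getD 0))
    else pvBFind pk b n prefb total rest

def split_public_key_alt (pk : String) (a : Int) (b : Int) : String × Option Int × Option Int :=
  let n : Int := (pk.toList.length : Int)
  -- candidate split positions: a-divisible prefix, no leading zero in the suffix
  let fst := (PySem.List.pyRange 1 n 1).foldl (fun (st : Int × List Int) i =>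
    let m := PySem.Int.mod (st.1 * 10 + pyIntChar ((PySem.List.pyGet? pk.toList (i - 1)).getD ' ')) a
    (m, if m = 0 ∧ (PySem.List.pyGet? pk.toList i).getD ' ' ≠ '0' then st.2 ++ [i] else st.2)) (0, [])
  if fst.2 ≠ [] then
    -- prefix-mod-b table and total mod b, one forward pass
    let pr := pk.toList.foldl (fun (st : List Int × Int) c =>
      (st.1 ++ [st.2], PySem.Int.mod (st.2 * 10 + pyIntChar c) b)) ([], 0)
    pvBFind pk b n pr.1 pr.2 fst.2.reverse
  else ("NO", none, none)

-- ===== PRECONDITION & SPEC =====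
-- Pre_ excludes exactly the inputs on which Python A raises: a non-digit character (ValueError),
-- a = 0 with nonempty pk (ZeroDivisionError in the first loop), and b = 0 when some split position
-- has an a-divisible prefix and no leading zero in the suffix (ZeroDivisionError in the second loop).
def Pre_split_public_key (pk : String) (a : Int) (b : Int) : Prop :=
  pk.toList.all PySem.Chars.isdigit = true ∧ (pk.toList = [] ∨ a ≠ 0) ∧
  (b ≠ 0 ∨ ∀ i ∈ List.range pk.toList.length, i = 0 ∨
    Int.fmod (pvVal (pk.toList.take i)) a ≠ 0 ∨ pk.toList.getD i ' ' = '0')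
instance (pk : String) (a : Int) (b : Int) : Decidable (Pre_split_public_key pk a b) := by
  unfold Pre_split_public_key; infer_instance
def pvWitness_split_public_key : String × Int × Int := ("1025", 2, 25)

def Spec_split_public_key (pk : String) (a : Int) (b : Int) (out : String × Option Int × Option Int) : Prop := out = split_public_key_alt pk a b
instance (pk : String) (a : Int) (b : Int) (out : String × Option Int × Option Int) : Decidable (Spec_split_public_key pk a b out) := by unfold Spec_split_public_key; infer_instance

-- ===== CLAIM (what is proved, stated in full; the proofs are below) =====
def Claim_equal_split_public_key : Prop := ∀ (pk : String) (a : Int) (b : Int), Dom_split_public_key pk a b → Pre_split_public_key pk a b → Spec_split_public_key pk a b (split_public_key pk a b)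

-- ===== LEMMAS AND PROOFS =====

-- prefix modulus of the first chars of the key (Horner with mod at each step)
def pvPm (a : Int) (l : List Char) : Int :=
  l.foldl (fun m c => PySem.Int.mod (m * 10 + pyIntChar c) a) 0

-- one suffix step (the recurrence A iterates)
def pvSStep (pk : String) (b : Int) (q : Int × Int) (j : Int) : Int × Int :=
  (PySem.Int.mod (q.1 + pyIntChar ((PySem.List.pyGet? pk.toList j).getD ' ') * q.2) b,
   PySem.Int.mod (q.2 * 10) b)

-- suffix state after consuming indices n-1, …, i
def pvV (pk : String) (b : Int) (i : Int) : Int × Int :=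
  (PySem.List.pyRange ((pk.toList.length : Int) - 1) (i - 1) (-1)).foldl (pvSStep pk b) (0, 1)

def pvQA (pk : String) (a : Int) (i : Int) : Bool :=
  decide (pvPm a (pk.toList.take i.toNat) = 0) &&
  decide ((PySem.List.pyGet? pk.toList i).getD ' ' ≠ '0')

def pvCond (pk : String) (a b : Int) (i : Int) : Bool :=
  pvQA pk a i && decide ((pvV pk b i).1 = 0)

def pvOut (pk : String) (i : Int) : String × Option Int × Option Int :=
  ("YES", some ((PySem.Int.ofStr? (PySem.Str.slice pk none (some i))).getD 0),
          some ((PySem.Int.ofStr? (PySem.Str.slice pk (some i) none)).getD 0))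

def pvFind (pk : String) (a b : Int) (rng : List Int) : String × Option Int × Option Int :=
  match rng.find? (pvCond pk a b) with
  | some i => pvOut pk i
  | none => ("NO", none, none)

theorem pvPm_append (a : Int) (l : List Char) (c : Char) :
    pvPm a (l ++ [c]) = PySem.Int.mod (pvPm a l * 10 + pyIntChar c) a := by
  simp [pvPm]

-- countdown range splits at any midpoint
theorem pvRange_neg_split (x m y : Int) (h1 : y ≤ m) (h2 : m ≤ x) :
    PySem.List.pyRange x y (-1) = PySem.List.pyRange x m (-1) ++ PySem.List.pyRange m y (-1) := by
  rw [PySem.List.pyRange_neg_one_eq_reverse, PySem.List.pyRange_neg_one_eq_reverse,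
    PySem.List.pyRange_neg_one_eq_reverse, ← List.reverse_append,
    ← PySem.List.pyRange_one_append (y+1) (m+1) (x+1) (by omega) (by omega)]

theorem pvRange_neg_getLast (x y : Int) (h : y < x) :
    (PySem.List.pyRange x y (-1)).getLast? = some (y + 1) := by
  rw [PySem.List.pyRange_neg_one_eq_reverse, List.getLast?_reverse,
    PySem.List.pyRange_one_cons (by omega)]
  rfl

-- chunk composition for the suffix state
theorem pvV_chunk (pk : String) (b : Int) (i₀ pos : Int) (h1 : pos ≤ i₀)
    (h2 : i₀ ≤ (pk.toList.length : Int)) :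
    pvV pk b pos =
      (PySem.List.pyRange (i₀ - 1) (pos - 1) (-1)).foldl (pvSStep pk b) (pvV pk b i₀) := by
  unfold pvV
  rw [pvRange_neg_split ((pk.toList.length : Int) - 1) (i₀ - 1) (pos - 1) (by omega) (by omega),
    List.foldl_append]

-- the 3-state inner fold is the 2-state fold plus the last index
theorem pvAInner_eq (pk : String) (b : Int) (rng : List Int) (st : Int × Int × Int) :
    pvAInner pk b rng st =
      ((rng.foldl (pvSStep pk b) (st.1, st.2.1)).1,
       (rng.foldl (pvSStep pk b) (st.1, st.2.1)).2,
       (rng.getLast?).getD st.2.2) := by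
  induction rng generalizing st with
  | nil => rfl
  | cons x xs ih =>
    simp only [pvAInner, List.foldl_cons] at *
    rw [ih]
    cases xs with
    | nil => simp [pvSStep]
    | cons y ys =>
      have hs : ((y :: ys).getLast?).isSome := List.getLast?_isSome.2 (by simp)
      obtain ⟨z, hz⟩ := Option.isSome_iff_exists.1 hs
      simp [pvSStep, hz]

-- A's first loop produces the filtered candidate list
theorem pvA_first_loop (pk : String) (a : Int) (k : Nat) (hk : k ≤ pk.toList.length) :
    (pk.toList.take k).foldl (pvAStep1 pk a (pk.toList.length : Int)) (0, 0, []) =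
      ((k : Int), pvPm a (pk.toList.take k),
       (PySem.List.pyRange 1 ((k : Int) + 1) 1).filter (fun i =>
         decide (i < (pk.toList.length : Int) ∧ pvPm a (pk.toList.take i.toNat) = 0 ∧
           (PySem.List.pyGet? pk.toList i).getD ' ' ≠ '0'))) := by
  induction k with
  | zero =>
    simp [pvPm]
  | succ k ih =>
    have hklt : k < pk.toList.length := by omega
    have hsplit : pk.toList.take (k+1) = pk.toList.take k ++ [pk.toList[k]] := by
      rw [List.take_add_one, List.getElem?_eq_getElem hklt]; rfl
    have hcast : ((k+1:Nat):Int) = (k:Int)+1 := by push_cast; ring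
    have htn : ((k:Int)+1).toNat = k+1 := by omega
    have hpm : pvPm a (pk.toList.take (k+1)) =
        PySem.Int.mod (pvPm a (pk.toList.take k) * 10 + pyIntChar pk.toList[k]) a := by
      rw [hsplit, pvPm_append]
    rw [hsplit]
    rw [List.foldl_append, ih (by omega)]
    simp only [List.foldl_cons, List.foldl_nil, pvAStep1, Prod.mk.injEq]
    refine ⟨by omega, by rw [pvPm_append], ?_⟩
    rw [hcast, PySem.List.pyRange_one_succ_right (by omega : (1:Int) ≤ (k:Int)+1),
      List.filter_append]
    have hone : List.filter (fun i =>
        decide (i < (pk.toList.length : Int) ∧ pvPm a (pk.toList.take i.toNat) = 0 ∧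
          (PySem.List.pyGet? pk.toList i).getD ' ' ≠ '0')) [(k:Int)+1] =
        if (k:Int)+1 < (pk.toList.length : Int) ∧
            PySem.Int.mod (pvPm a (pk.toList.take k) * 10 + pyIntChar pk.toList[k]) a = 0 ∧
            (PySem.List.pyGet? pk.toList ((k:Int)+1)).getD ' ' ≠ '0'
          then [(k:Int)+1] else [] := by
      simp only [List.filter_cons, List.filter_nil, decide_eq_true_eq, htn, hpm]
    rw [hone]
    by_cases h : (k:Int)+1 < (pk.toList.length : Int) ∧
        PySem.Int.mod (pvPm a (pk.toList.take k) * 10 + pyIntChar pk.toList[k]) a = 0 ∧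
        (PySem.List.pyGet? pk.toList ((k:Int)+1)).getD ' ' ≠ '0'
    · rw [if_pos h, if_pos h]
    · rw [if_neg h, if_neg h, List.append_nil]

theorem pvA_loop_eq (pk : String) (a b : Int) (k : Nat) : ∀ (i₀ : Int),
    (k : Int) < i₀ → i₀ ≤ (pk.toList.length : Int) →
    pvALoop pk b ((PySem.List.pyRange (k : Int) 0 (-1)).filter (pvQA pk a))
        ((pvV pk b i₀).1, (pvV pk b i₀).2, i₀) =
      pvFind pk a b (PySem.List.pyRange (k : Int) 0 (-1)) := by
  induction k with
  | zero =>
    intro i₀ h1 h2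
    simp [pvALoop, pvFind, PySem.List.pyRange_neg_one_eq_nil (by omega : (0:Int) ≤ 0)]
  | succ k ih =>
    intro i₀ h1 h2
    have e1 : ((k+1:Nat):Int) = (k:Int)+1 := by push_cast; ring
    rw [e1] at h1 ⊢
    have hc : PySem.List.pyRange ((k:Int)+1) 0 (-1) = ((k:Int)+1) :: PySem.List.pyRange (k:Int) 0 (-1) := by
      rw [PySem.List.pyRange_neg_one_cons (by omega : (0:Int) < (k:Int)+1)]
      rw [show (k:Int)+1-1 = (k:Int) from by ring]
    rw [hc, List.filter_cons]
    by_cases hq : pvQA pk a ((k:Int)+1) = true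
    · rw [if_pos hq]
      simp only [pvALoop]
      have hinner : pvAInner pk b (PySem.List.pyRange (i₀-1) ((k:Int)+1-1) (-1))
          ((pvV pk b i₀).1, (pvV pk b i₀).2, i₀)
          = ((pvV pk b ((k:Int)+1)).1, (pvV pk b ((k:Int)+1)).2, (k:Int)+1) := by
        rw [pvAInner_eq, pvRange_neg_getLast (i₀-1) ((k:Int)+1-1) (by omega)]
        simp only [Prod.mk.eta, Option.getD_some]
        rw [← pvV_chunk pk b i₀ ((k:Int)+1) (by omega) h2]
        rw [show (k:Int)+1-1+1 = (k:Int)+1 from by ring]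
      rw [hinner]
      by_cases hz : (pvV pk b ((k:Int)+1)).1 = 0
      · rw [if_pos hz]
        have hcT : pvCond pk a b ((k:Int)+1) = true := by
          simp [pvCond, hq, hz]
        have hf : List.find? (pvCond pk a b) (((k:Int)+1) :: PySem.List.pyRange (k:Int) 0 (-1))
            = some ((k:Int)+1) := List.find?_cons_of_pos hcT
        simp only [pvFind, hf]
        rfl
      · rw [if_neg hz]
        have hcF : pvCond pk a b ((k:Int)+1) = false := by
          simp [pvCond, hq, hz]
        have hf : List.find? (pvCond pk a b) (((k:Int)+1) :: PySem.List.pyRange (k:Int) 0 (-1))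
            = List.find? (pvCond pk a b) (PySem.List.pyRange (k:Int) 0 (-1)) :=
          List.find?_cons_of_neg (by rw [hcF]; simp)
        simp only [pvFind, hf]
        exact ih ((k:Int)+1) (by omega) (by omega)
    · rw [if_neg hq]
      have hcF : pvCond pk a b ((k:Int)+1) = false := by
        simp only [pvCond, Bool.and_eq_false_iff]
        left; exact Bool.eq_false_iff.2 hq
      have hf : List.find? (pvCond pk a b) (((k:Int)+1) :: PySem.List.pyRange (k:Int) 0 (-1))
          = List.find? (pvCond pk a b) (PySem.List.pyRange (k:Int) 0 (-1)) :=
        List.find?_cons_of_neg (by rw [hcF]; simp)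
      simp only [pvFind, hf]
      exact ih i₀ (by omega) h2

theorem pvFilter_big (pk : String) (a : Int) (hn : 1 ≤ pk.toList.length) :
    (PySem.List.pyRange 1 ((pk.toList.length : Int) + 1) 1).filter (fun i =>
        decide (i < (pk.toList.length : Int) ∧ pvPm a (pk.toList.take i.toNat) = 0 ∧
          (PySem.List.pyGet? pk.toList i).getD ' ' ≠ '0')) =
      (PySem.List.pyRange 1 (pk.toList.length : Int) 1).filter (pvQA pk a) := by
  rw [PySem.List.pyRange_one_succ_right (by exact_mod_cast hn), List.filter_append]
  have h1 : List.filter (fun i =>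
      decide (i < (pk.toList.length : Int) ∧ pvPm a (pk.toList.take i.toNat) = 0 ∧
        (PySem.List.pyGet? pk.toList i).getD ' ' ≠ '0')) [(pk.toList.length : Int)] = [] := by
    simp
  rw [h1, List.append_nil]
  apply List.filter_congr
  intro i hi
  rw [PySem.List.mem_pyRange_one] at hi
  simp [pvQA, show i < ((pk.length:Nat) : Int) from by simpa using hi.2]

-- ---- arithmetic toolkit: Python's % is Int.fmod ----

theorem pvFmod_sub_self (x b : Int) : b ∣ x - Int.fmod x b := by
  rw [Int.fmod_def]
  exact ⟨x.fdiv b, by ring⟩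

theorem pvFmod_congr (b x y : Int) (h : b ∣ x - y) : Int.fmod x b = Int.fmod y b := by
  obtain ⟨c, hc⟩ := h
  have hx : x = y + b * c := by omega
  subst hx
  rw [Int.add_fmod, Int.mul_fmod_right, add_zero, Int.fmod_fmod_of_dvd _ dvd_rfl]

-- ---- value of a digit string ----

theorem pvVal_go (l : List Char) (v : Int) :
    l.foldl (fun v c => v * 10 + pyIntChar c) v = v * 10 ^ l.length + pvVal l := by
  induction l generalizing v with
  | nil => simp [pvVal]
  | cons c t ih =>
    simp only [List.foldl_cons, List.length_cons, pvVal]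
    rw [ih, ih (0 * 10 + pyIntChar c)]
    ring

theorem pvVal_append (s t : List Char) :
    pvVal (s ++ t) = pvVal s * 10 ^ t.length + pvVal t := by
  rw [pvVal, List.foldl_append, ← pvVal, pvVal_go]

-- Horner-with-mod computes the value's fmod
theorem pvPm_eq_fmod (a : Int) (l : List Char) : pvPm a l = Int.fmod (pvVal l) a := by
  induction l using List.reverseRecOn with
  | nil => simp [pvPm, pvVal]
  | append_singleton t c ih =>
    rw [pvPm_append, ih, pvVal_append]
    show Int.fmod _ a = _
    apply pvFmod_congr
    obtain ⟨k, hk⟩ := pvFmod_sub_self (pvVal t) a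
    have e1 : Int.fmod (pvVal t) a = pvVal t - a * k := by omega
    refine ⟨-(k * 10), ?_⟩
    rw [e1]
    simp only [List.length_cons, List.length_nil, pvVal, List.foldl_cons, List.foldl_nil]
    ring

-- characterization of A's suffix state: first component is fmod of the suffix value,
-- second is congruent to the corresponding power of ten
theorem pvV_spec (pk : String) (b : Int) (k : Nat) (hk : k ≤ pk.toList.length) :
    (pvV pk b ((pk.toList.length : Int) - (k : Int))).1 =
      Int.fmod (pvVal (pk.toList.drop (pk.toList.length - k))) b ∧
    b ∣ ((pvV pk b ((pk.toList.length : Int) - (k : Int))).2 - 10 ^ k) := by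
  induction k with
  | zero =>
    have h0 : pvV pk b ((pk.toList.length : Int) - ((0:Nat) : Int)) = (0, 1) := by
      unfold pvV
      rw [PySem.List.pyRange_neg_one_eq_nil (by omega)]
      rfl
    rw [h0]
    constructor
    · show (0:Int) = _
      rw [show pk.toList.length - 0 = pk.toList.length from rfl, List.drop_length]
      simp [pvVal]
    · simp
  | succ k ih =>
    have ihs := ih (by omega)
    have hstep : pvV pk b ((pk.toList.length : Int) - ((k+1:Nat) : Int)) =
        pvSStep pk b (pvV pk b ((pk.toList.length : Int) - (k : Int)))
          ((pk.toList.length : Int) - (k : Int) - 1) := by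
      rw [show ((pk.toList.length : Int) - ((k+1:Nat) : Int)) = ((pk.toList.length : Int) - (k : Int)) - 1 from by push_cast; ring]
      rw [pvV_chunk pk b ((pk.toList.length : Int) - (k : Int))
        ((pk.toList.length : Int) - (k : Int) - 1) (by omega) (by omega)]
      rw [show PySem.List.pyRange ((pk.toList.length : Int) - (k : Int) - 1)
            ((pk.toList.length : Int) - (k : Int) - 1 - 1) (-1)
            = [(pk.toList.length : Int) - (k : Int) - 1] from by
        rw [PySem.List.pyRange_neg_one_cons (by omega)]
        rw [PySem.List.pyRange_neg_one_eq_nil (by omega)]]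
      rfl
    have hlt : pk.toList.length - (k + 1) < pk.toList.length := by omega
    have hget : (PySem.List.pyGet? pk.toList ((pk.toList.length : Int) - (k : Int) - 1)).getD ' '
        = pk.toList[pk.toList.length - (k+1)] := by
      rw [show (pk.toList.length : Int) - (k : Int) - 1 = ((pk.toList.length - (k+1) : Nat) : Int) from by omega,
        PySem.List.pyGet?_natCast, List.getElem?_eq_getElem hlt]
      rfl
    have hdropsplit : pk.toList.drop (pk.toList.length - (k+1)) =
        pk.toList[pk.toList.length - (k+1)] :: pk.toList.drop (pk.toList.length - k) := by
      have hidx2 : pk.toList.length - (k+1) + 1 = pk.toList.length - k := by omega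
      rw [List.drop_eq_getElem_cons hlt, hidx2]
    have hlen : (pk.toList.drop (pk.toList.length - k)).length = k := by
      rw [List.length_drop]
      omega
    have hvalsplit : pvVal (pk.toList.drop (pk.toList.length - (k+1))) =
        pyIntChar pk.toList[pk.toList.length - (k+1)] * 10 ^ k +
          pvVal (pk.toList.drop (pk.toList.length - k)) := by
      rw [hdropsplit]
      have h := pvVal_append [pk.toList[pk.toList.length - (k+1)]] (pk.toList.drop (pk.toList.length - k))
      simp only [List.singleton_append, hlen] at h
      rw [h]
      simp [pvVal]
    obtain ⟨c1, hc1⟩ := pvFmod_sub_self (pvVal (pk.toList.drop (pk.toList.length - k))) b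
    obtain ⟨c2, hc2⟩ := ihs.2
    have e1 : Int.fmod (pvVal (pk.toList.drop (pk.toList.length - k))) b
        = pvVal (pk.toList.drop (pk.toList.length - k)) - b * c1 := by omega
    have e2 : (pvV pk b ((pk.toList.length : Int) - (k : Int))).2 = 10 ^ k + b * c2 := by omega
    constructor
    · rw [hstep]
      show PySem.Int.mod _ b = _
      simp only [PySem.Int.mod]
      rw [ihs.1]
      apply pvFmod_congr
      rw [hvalsplit, hget, e1, e2]
      exact ⟨pyIntChar pk.toList[pk.toList.length - (k+1)] * c2 - c1, by ring⟩
    · rw [hstep]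
      show b ∣ PySem.Int.mod ((pvV pk b ((pk.toList.length : Int) - (k : Int))).2 * 10) b - 10 ^ (k+1)
      simp only [PySem.Int.mod]
      obtain ⟨c3, hc3⟩ := pvFmod_sub_self ((pvV pk b ((pk.toList.length : Int) - (k : Int))).2 * 10) b
      have e3 : Int.fmod ((pvV pk b ((pk.toList.length : Int) - (k : Int))).2 * 10) b
          = (pvV pk b ((pk.toList.length : Int) - (k : Int))).2 * 10 - b * c3 := by omega
      rw [e3, e2]
      exact ⟨10 * c2 - c3, by ring⟩

-- B's candidate loop produces the same filtered list as A's
theorem pvB_cand_loop (pk : String) (a : Int) (k : Nat) (hk : k + 1 ≤ pk.toList.length) :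
    (PySem.List.pyRange 1 ((k : Int) + 1) 1).foldl (fun (st : Int × List Int) i =>
      let m := PySem.Int.mod (st.1 * 10 + pyIntChar ((PySem.List.pyGet? pk.toList (i - 1)).getD ' ')) a
      (m, if m = 0 ∧ (PySem.List.pyGet? pk.toList i).getD ' ' ≠ '0' then st.2 ++ [i] else st.2)) (0, []) =
    (pvPm a (pk.toList.take k), (PySem.List.pyRange 1 ((k : Int) + 1) 1).filter (pvQA pk a)) := by
  induction k with
  | zero =>
    rw [PySem.List.pyRange_one_eq_nil (by omega)]
    simp [pvPm]
  | succ k ih =>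
    have hklt : k < pk.toList.length := by omega
    have e1 : ((k+1:Nat):Int) + 1 = ((k:Int)+1)+1 := by push_cast; ring
    rw [e1, PySem.List.pyRange_one_succ_right (by omega : (1:Int) ≤ (k:Int)+1),
      List.foldl_append, ih (by omega), List.filter_append]
    simp only [List.foldl_cons, List.foldl_nil]
    have hgetm : (PySem.List.pyGet? pk.toList ((k:Int)+1-1)).getD ' ' = pk.toList[k] := by
      rw [show (k:Int)+1-1 = ((k:Nat):Int) from by ring, PySem.List.pyGet?_natCast,
        List.getElem?_eq_getElem hklt]
      rfl
    have hsplit : pk.toList.take (k+1) = pk.toList.take k ++ [pk.toList[k]] := by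
      rw [List.take_add_one, List.getElem?_eq_getElem hklt]; rfl
    have hm : PySem.Int.mod (pvPm a (pk.toList.take k) * 10 +
        pyIntChar ((PySem.List.pyGet? pk.toList ((k:Int)+1-1)).getD ' ')) a
        = pvPm a (pk.toList.take (k+1)) := by
      rw [hgetm, hsplit, pvPm_append]
    have htn : ((k:Int)+1).toNat = k+1 := by omega
    simp only [hm]
    have hfil : List.filter (pvQA pk a) [(k:Int)+1] =
        if pvPm a (pk.toList.take (k+1)) = 0 ∧ (PySem.List.pyGet? pk.toList ((k:Int)+1)).getD ' ' ≠ '0'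
        then [(k:Int)+1] else [] := by
      by_cases hcd : pvPm a (pk.toList.take (k+1)) = 0 ∧ (PySem.List.pyGet? pk.toList ((k:Int)+1)).getD ' ' ≠ '0'
      · rw [if_pos hcd]
        have hq : pvQA pk a ((k:Int)+1) = true := by
          simp only [pvQA, htn, Bool.and_eq_true, decide_eq_true_eq]
          exact ⟨hcd.1, hcd.2⟩
        simp [hq]
      · rw [if_neg hcd]
        have hq : pvQA pk a ((k:Int)+1) = false := by
          rw [Bool.eq_false_iff]
          intro hT
          simp only [pvQA, htn, Bool.and_eq_true, decide_eq_true_eq] at hT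
          exact hcd ⟨hT.1, hT.2⟩
        simp [hq]
    rw [hfil]
    split_ifs with h
    · rfl
    · rw [List.append_nil]

-- B's table loop produces the prefix-mod table
theorem pvB_table_loop (pk : String) (b : Int) (k : Nat) (hk : k ≤ pk.toList.length) :
    (pk.toList.take k).foldl (fun (st : List Int × Int) c =>
        (st.1 ++ [st.2], PySem.Int.mod (st.2 * 10 + pyIntChar c) b)) ([], 0) =
      ((List.range k).map (fun j => pvPm b (pk.toList.take j)), pvPm b (pk.toList.take k)) := by
  induction k with
  | zero => simp [pvPm]
  | succ k ih =>
    have hklt : k < pk.toList.length := by omega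
    have hsplit : pk.toList.take (k+1) = pk.toList.take k ++ [pk.toList[k]] := by
      rw [List.take_add_one, List.getElem?_eq_getElem hklt]; rfl
    rw [hsplit, List.foldl_append, ih (by omega)]
    simp only [List.foldl_cons, List.foldl_nil, Prod.mk.injEq]
    refine ⟨by rw [List.range_succ]; simp, by rw [pvPm_append]⟩

-- B's test at split i equals "suffix value divisible by b"
theorem pvB_cond_eq (pk : String) (b : Int) (i : Nat) (hi : i ≤ pk.toList.length) :
    PySem.Int.mod (pvPm b pk.toList -
        Int.fmod (pvVal (pk.toList.take i)) b *
          pvPow10Mod ((pk.toList.length : Int) - (i : Int)) b) b =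
      Int.fmod (pvVal (pk.toList.drop i)) b := by
  have hsplit : pvVal pk.toList = pvVal (pk.toList.take i) * 10 ^ (pk.toList.length - i) + pvVal (pk.toList.drop i) := by
    conv_lhs => rw [← List.take_append_drop i pk.toList]
    rw [pvVal_append]
    congr 2
    simp
  have htn : ((pk.toList.length : Int) - (i : Int)).toNat = pk.toList.length - i := by omega
  show Int.fmod _ b = _
  rw [pvPm_eq_fmod]
  apply pvFmod_congr
  simp only [pvPow10Mod, PySem.Int.mod, htn]
  obtain ⟨c1, hc1⟩ := pvFmod_sub_self (pvVal pk.toList) b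
  obtain ⟨c2, hc2⟩ := pvFmod_sub_self (pvVal (pk.toList.take i)) b
  obtain ⟨c3, hc3⟩ := pvFmod_sub_self ((10:Int) ^ (pk.toList.length - i)) b
  have e1 : Int.fmod (pvVal pk.toList) b = pvVal pk.toList - b * c1 := by omega
  have e2 : Int.fmod (pvVal (pk.toList.take i)) b = pvVal (pk.toList.take i) - b * c2 := by omega
  have e3 : Int.fmod ((10:Int) ^ (pk.toList.length - i)) b = 10 ^ (pk.toList.length - i) - b * c3 := by omega
  refine ⟨c2 * 10 ^ (pk.toList.length - i) + pvVal (pk.toList.take i) * c3 - b * c2 * c3 - c1, ?_⟩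
  rw [e1, e2, e3, hsplit]
  ring

-- B's find loop is a find? over its test
theorem pvBFind_eq_find? (pk : String) (b n total : Int) (prefb : List Int) (l : List Int) :
    pvBFind pk b n prefb total l =
      match l.find? (fun i =>
          decide (PySem.Int.mod (total - PySem.List.pyGetD prefb i 0 * pvPow10Mod (n - i) b) b = 0)) with
      | some i => pvOut pk i
      | none => ("NO", none, none) := by
  induction l with
  | nil => rfl
  | cons x xs ih =>
    simp only [pvBFind, List.find?_cons]
    by_cases h : PySem.Int.mod (total - PySem.List.pyGetD prefb x 0 * pvPow10Mod (n - x) b) b = 0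
    · rw [if_pos h, decide_eq_true h]
      rfl
    · rw [if_neg h, decide_eq_false h]
      exact ih

theorem pvFind?_congr_mem {α : Type} (l : List α) (p q : α → Bool)
    (h : ∀ x ∈ l, p x = q x) : l.find? p = l.find? q := by
  induction l with
  | nil => rfl
  | cons x xs ih =>
    simp only [List.find?_cons]
    rw [h x (by simp), ih (fun y hy => h y (by simp [hy]))]

-- ===== VERDICT (by name: the statement is the Claim_ definition above) =====
theorem split_public_key_spec : Claim_equal_split_public_key := by
  intro pk a b _ _
  unfold Spec_split_public_key
  by_cases h0 : pk.toList.length = 0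
  · have hnil : pk.toList = [] := List.length_eq_zero_iff.1 h0
    simp only [split_public_key, split_public_key_alt, hnil]
    rw [PySem.List.pyRange_one_eq_nil (by simp)]
    simp [pvALoop]
  · have hn : 1 ≤ pk.toList.length := by omega
    have hcast : ((pk.toList.length - 1 : Nat) : Int) = (pk.toList.length : Int) - 1 := by omega
    have hrev : PySem.List.pyRange ((pk.toList.length : Int) - 1) 0 (-1) =
        (PySem.List.pyRange 1 (pk.toList.length : Int) 1).reverse := by
      rw [PySem.List.pyRange_neg_one_eq_reverse]
      norm_num
    have hV0 : pvV pk b (pk.toList.length : Int) = (0, 1) := by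
      unfold pvV
      rw [PySem.List.pyRange_neg_one_eq_nil (by omega)]
      rfl
    -- A side: A = pvFind over the descending range
    have hA := pvA_first_loop pk a pk.toList.length le_rfl
    rw [List.take_length] at hA
    have hAside : split_public_key pk a b =
        pvFind pk a b (PySem.List.pyRange ((pk.toList.length : Int) - 1) 0 (-1)) := by
      show pvALoop pk b
        ((pk.toList.foldl (pvAStep1 pk a (pk.toList.length : Int)) (0,0,[])).2.2).reverse
        (0, 1, (pk.toList.length : Int)) = _
      rw [hA]
      show pvALoop pk b (List.filter _ (PySem.List.pyRange 1 ((pk.toList.length : Int) + 1) 1)).reverse _ = _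
      rw [pvFilter_big pk a hn, ← List.filter_reverse, ← hrev]
      have h := pvA_loop_eq pk a b (pk.toList.length - 1) (pk.toList.length : Int) (by omega) (by omega)
      rw [hcast] at h
      rw [← h, hV0]
    -- B side: B = pvFind over the same range
    have hBcand := pvB_cand_loop pk a (pk.toList.length - 1) (by omega)
    rw [hcast, show (pk.toList.length : Int) - 1 + 1 = (pk.toList.length : Int) from by ring] at hBcand
    have hBtab := pvB_table_loop pk b pk.toList.length le_rfl
    rw [List.take_length] at hBtab
    have hmem : ∀ i ∈ PySem.List.pyRange ((pk.toList.length : Int) - 1) 0 (-1),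
        1 ≤ i ∧ i ≤ (pk.toList.length : Int) - 1 := by
      intro i hi
      rw [hrev, List.mem_reverse, PySem.List.mem_pyRange_one] at hi
      omega
    have hcond : ∀ i ∈ PySem.List.pyRange ((pk.toList.length : Int) - 1) 0 (-1),
        decide (PySem.Int.mod (pvPm b pk.toList -
            PySem.List.pyGetD ((List.range pk.toList.length).map (fun j => pvPm b (pk.toList.take j))) i 0 *
              pvPow10Mod ((pk.toList.length : Int) - i) b) b = 0)
          = decide ((pvV pk b i).1 = 0) := by
      intro i hi
      obtain ⟨hi1, hi2⟩ := hmem i hi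
      obtain ⟨j, hj, hjle⟩ : ∃ j : Nat, (j : Int) = i ∧ j ≤ pk.toList.length - 1 :=
        ⟨i.toNat, by omega, by omega⟩
      subst hj
      have hjlt : j < pk.toList.length := by omega
      have hpref : PySem.List.pyGetD ((List.range pk.toList.length).map
          (fun j => pvPm b (pk.toList.take j))) (j:Int) 0 = pvPm b (pk.toList.take j) := by
        rw [PySem.List.pyGetD_natCast]
        rw [List.getD_eq_getElem _ _ (by simpa using hjlt)]
        simp
      have hVj : (pvV pk b (j:Int)).1 = Int.fmod (pvVal (pk.toList.drop j)) b := by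
        have h := (pvV_spec pk b (pk.toList.length - j) (by omega)).1
        rw [show pk.toList.length - (pk.toList.length - j) = j from by omega,
          show ((pk.toList.length : Int) - ((pk.toList.length - j : Nat) : Int)) = (j : Int) from by omega] at h
        exact h
      rw [hpref, pvPm_eq_fmod b (pk.toList.take j), pvB_cond_eq pk b j (by omega), hVj]
    have hBside : split_public_key_alt pk a b =
        pvFind pk a b (PySem.List.pyRange ((pk.toList.length : Int) - 1) 0 (-1)) := by
      show (if ((PySem.List.pyRange 1 (pk.toList.length : Int) 1).foldl _ (0, [])).2 ≠ [] then _ else _) = _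
      rw [hBcand]
      by_cases hcandnil : (PySem.List.pyRange 1 (pk.toList.length : Int) 1).filter (pvQA pk a) = []
      · rw [if_neg (by simpa using hcandnil)]
        have hnone : (PySem.List.pyRange ((pk.toList.length : Int) - 1) 0 (-1)).find? (pvCond pk a b) = none := by
          rw [List.find?_eq_none]
          intro x hx
          have hxq : ¬ pvQA pk a x = true := by
            refine (List.filter_eq_nil_iff).1 hcandnil x ?_
            rw [hrev, List.mem_reverse] at hx
            exact hx
          simp only [pvCond, Bool.and_eq_true]
          tauto
        unfold pvFind
        rw [hnone]
      · rw [if_pos (by simpa using hcandnil)]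
        rw [hBtab]
        show pvBFind pk b (pk.toList.length : Int) _ _ _ = _
        rw [pvBFind_eq_find?]
        rw [show ((PySem.List.pyRange 1 (pk.toList.length : Int) 1).filter (pvQA pk a)).reverse
            = (PySem.List.pyRange ((pk.toList.length : Int) - 1) 0 (-1)).filter (pvQA pk a) from by
          rw [hrev, List.filter_reverse]]
        rw [List.find?_filter]
        have hfind : (PySem.List.pyRange ((pk.toList.length : Int) - 1) 0 (-1)).find?
            (fun i => decide (pvQA pk a i = true ∧
              decide (PySem.Int.mod (pvPm b pk.toList -
                PySem.List.pyGetD ((List.range pk.toList.length).map (fun j => pvPm b (pk.toList.take j))) i 0 *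
                  pvPow10Mod ((pk.toList.length : Int) - i) b) b = 0) = true))
            = (PySem.List.pyRange ((pk.toList.length : Int) - 1) 0 (-1)).find? (pvCond pk a b) := by
          apply pvFind?_congr_mem
          intro x hx
          rw [show (decide (PySem.Int.mod (pvPm b pk.toList -
                PySem.List.pyGetD ((List.range pk.toList.length).map (fun j => pvPm b (pk.toList.take j))) x 0 *
                  pvPow10Mod ((pk.toList.length : Int) - x) b) b = 0)) = decide ((pvV pk b x).1 = 0) from hcond x hx]
          simp [pvCond]
        rw [hfind]
        rfl
    rw [hAside, hBside]
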